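-- pv_equiv track=rewrite | github.com/AG-1laksh/CrediShieldXAI | model_trainer.py | _build_feature_map
-- ===== SOURCE A (Python) =====
-- from typing import Any, Dict, List, Tuple
--
-- def _build_feature_map(
--     feature_names: List[str],
--     categorical_features: List[str],
--     numerical_features: List[str],
-- ) -> Dict[str, str]:
--     """Map transformed feature names back to base business feature names."""
--     feature_map: Dict[str, str] = {}
--
--     # Numeric features are straightforward: num__feature_name
--     for col in numerical_features:
--         transformed_name = f"num__{col}"
--         feature_map[transformed_name] = col
--
--     # Categorical one-hot outputs look like cat__<column>_<category>
--     for transformed_name in feature_names: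
--         if transformed_name.startswith("cat__"):
--             stripped = transformed_name.removeprefix("cat__")
--             mapped = stripped
--             for col in categorical_features:
--                 prefix = f"{col}_"
--                 if stripped == col or stripped.startswith(prefix):
--                     mapped = col
--                     break
--             feature_map[transformed_name] = mapped
--         elif transformed_name.startswith("num__") and transformed_name not in feature_map:
--             feature_map[transformed_name] = transformed_name.removeprefix("num__")
--         else:
--             feature_map[transformed_name] = transformed_name
--
--     return feature_map
-- ===== SOURCE B (Python) =====
-- from typing import Dict, List
--
--
-- def _build_feature_map(
--     feature_names: List[str],
--     categorical_features: List[str],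
--     numerical_features: List[str],
-- ) -> Dict[str, str]:
--     """Map transformed feature names back to base business feature names.
--
--     Same behaviour as the original, but the categorical columns are indexed
--     in a dict once and each cat__ name is resolved by probing only its
--     underscore-boundary prefixes (picking the match of smallest column
--     index), instead of scanning every categorical column per feature name.
--     """
--     feature_map: Dict[str, str] = {"num__" + col: col for col in numerical_features}
--
--     cat_index: Dict[str, int] = {}
--     for i, col in enumerate(categorical_features):
--         if col not in cat_index:
--             cat_index[col] = i
--
--     for t in feature_names:
--         if t.startswith("cat__"):
--             stripped = t[5:]
--             best = None
--             k = cat_index.get(stripped)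
--             if k is not None:
--                 best = (k, stripped)
--             for j, ch in enumerate(stripped):
--                 if ch == "_":
--                     c = stripped[:j]
--                     k = cat_index.get(c)
--                     if k is not None and (best is None or k < best[0]):
--                         best = (k, c)
--             feature_map[t] = best[1] if best is not None else stripped
--         elif t.startswith("num__") and t not in feature_map:
--             feature_map[t] = t[5:]
--         else:
--             feature_map[t] = t
--
--     return feature_map
-- ===== Notes on version B (the rewrite author's own statement) =====
-- stated objective: alternative
-- what changed: Replaces A's per-feature linear scan over all categorical columns (a startswith test against every column) by a dict index of the columns built once and probed only at the underscore-boundary prefixes of each cat__ name, the match with minimal column index winning; the numeric/else handling is unchanged.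
import Mathlib
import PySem

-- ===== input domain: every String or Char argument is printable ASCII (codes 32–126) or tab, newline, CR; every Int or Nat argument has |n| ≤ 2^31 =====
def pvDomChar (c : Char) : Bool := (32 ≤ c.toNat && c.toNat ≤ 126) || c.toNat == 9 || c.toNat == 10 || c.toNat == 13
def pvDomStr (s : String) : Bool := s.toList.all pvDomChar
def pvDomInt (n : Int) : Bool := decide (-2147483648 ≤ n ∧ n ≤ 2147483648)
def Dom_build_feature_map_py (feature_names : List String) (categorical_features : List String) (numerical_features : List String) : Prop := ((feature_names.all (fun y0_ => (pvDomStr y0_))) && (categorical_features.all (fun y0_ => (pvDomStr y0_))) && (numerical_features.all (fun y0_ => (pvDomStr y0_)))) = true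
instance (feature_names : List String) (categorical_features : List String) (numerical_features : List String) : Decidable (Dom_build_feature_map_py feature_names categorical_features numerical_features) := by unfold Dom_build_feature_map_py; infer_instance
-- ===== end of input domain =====

-- B resolves each cat__ name by probing a dict index of the categorical columns at the name's
-- underscore-boundary prefixes (min column index wins) instead of A's linear scan over all
-- columns; the numeric/else handling and the returned dict are identical to A's.

-- ===== PORT A =====
def pvRemoveprefix (s p : String) : String :=
  if PySem.Str.startswith s p then PySem.Str.slice s (some (PySem.Str.len p)) none else s

def pvCatLoopA (stripped : String) : List String → String
  | [] => stripped
  | col :: rest =>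
      if stripped == col || PySem.Str.startswith stripped (col ++ "_") then col
      else pvCatLoopA stripped rest

def build_feature_map_py (feature_names : List String) (categorical_features : List String) (numerical_features : List String) : List (String × String) :=
  let fm0 : PySem.Dict String String :=
    numerical_features.foldl (fun d col => d.insert ("num__" ++ col) col) PySem.Dict.empty
  let fm := feature_names.foldl (fun d t =>
      if PySem.Str.startswith t "cat__" then
        d.insert t (pvCatLoopA (pvRemoveprefix t "cat__") categorical_features)
      else if PySem.Str.startswith t "num__" && !(d.contains t) then
        d.insert t (pvRemoveprefix t "num__")
      else d.insert t t) fm0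
  fm.items

-- ===== PORT B =====
def pvCatIndex (cats : List String) : PySem.Dict String Int :=
  (PySem.List.enumerate cats).foldl
    (fun d p => if d.contains p.2 then d else d.insert p.2 p.1) PySem.Dict.empty

def pvBestStep (catIndex : PySem.Dict String Int) (stripped : String)
    (best : Option (Int × String)) (p : Int × Char) : Option (Int × String) :=
  if p.2 == '_' then
    let c := PySem.Str.slice stripped none (some p.1)
    match catIndex.get? c with
    | some k =>
        match best with
        | none => some (k, c)
        | some b => if k < b.1 then some (k, c) else best
    | none => best
  else best

def pvMappedB (catIndex : PySem.Dict String Int) (stripped : String) : String :=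
  let best0 : Option (Int × String) :=
    match catIndex.get? stripped with
    | some k => some (k, stripped)
    | none => none
  let best := (PySem.List.enumerate stripped.toList).foldl (pvBestStep catIndex stripped) best0
  match best with
  | some b => b.2
  | none => stripped

def build_feature_map_py_alt (feature_names : List String) (categorical_features : List String) (numerical_features : List String) : List (String × String) :=
  let fm0 : PySem.Dict String String :=
    numerical_features.foldl (fun d col => d.insert ("num__" ++ col) col) PySem.Dict.empty
  let catIndex := pvCatIndex categorical_features
  let fm := feature_names.foldl (fun d t =>
      if PySem.Str.startswith t "cat__" then
        d.insert t (pvMappedB catIndex (PySem.Str.slice t (some 5) none))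
      else if PySem.Str.startswith t "num__" && !(d.contains t) then
        d.insert t (PySem.Str.slice t (some 5) none)
      else d.insert t t) fm0
  fm.items

-- ===== PRECONDITION & SPEC =====
def Spec_build_feature_map_py (feature_names : List String) (categorical_features : List String) (numerical_features : List String) (out : List (String × String)) : Prop := out = build_feature_map_py_alt feature_names categorical_features numerical_features
instance (feature_names : List String) (categorical_features : List String) (numerical_features : List String) (out : List (String × String)) : Decidable (Spec_build_feature_map_py feature_names categorical_features numerical_features out) := by unfold Spec_build_feature_map_py; infer_instance

-- ===== CLAIM =====
def Claim_equal_build_feature_map_py : Prop := ∀ (feature_names : List String) (categorical_features : List String) (numerical_features : List String), Dom_build_feature_map_py feature_names categorical_features numerical_features → Spec_build_feature_map_py feature_names categorical_features numerical_features (build_feature_map_py feature_names categorical_features numerical_features)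

-- ===== LEMMAS AND PROOFS =====

-- A's match test, and the candidate characterisation it satisfies
def pvP (s col : String) : Bool := s == col || PySem.Str.startswith s (col ++ "_")

def pvIsCand (s c : String) : Prop :=
  c = s ∨ ∃ j : Nat, s.toList[j]? = some '_' ∧ c.toList = s.toList.take j

lemma pv_append_singleton_prefix (t : List Char) (a : Char) (j : Nat) (hj : t[j]? = some a) :
    t.take j ++ [a] <+: t := by
  have hjlen : j < t.length := by
    by_contra h
    rw [List.getElem?_eq_none (by omega)] at hj
    simp at hj
  refine ⟨t.drop (j+1), ?_⟩
  have h2 : t.take (j+1) = t.take j ++ [a] := by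
    rw [List.take_add_one]
    simp [hj]
  calc t.take j ++ [a] ++ t.drop (j+1) = t.take (j+1) ++ t.drop (j+1) := by rw [h2]
    _ = t := List.take_append_drop _ _

lemma pv_prefix_append_singleton (l t : List Char) (a : Char) (h : l ++ [a] <+: t) :
    t[l.length]? = some a ∧ l = t.take l.length := by
  obtain ⟨r, hr⟩ := h
  subst hr
  constructor
  · simp
  · simp

lemma pvP_iff (s col : String) : pvP s col = true ↔ pvIsCand s col := by
  unfold pvP pvIsCand
  rw [Bool.or_eq_true, beq_iff_eq]
  constructor
  · rintro (h | h)
    · left; exact h.symm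
    · right
      rw [PySem.Str.startswith_eq, PySem.Chars.startswith_iff, String.toList_append] at h
      have h' : col.toList ++ ['_'] <+: s.toList := h
      obtain ⟨h1, h2⟩ := pv_prefix_append_singleton _ _ _ h'
      exact ⟨col.toList.length, h1, h2⟩
  · rintro (h | ⟨j, hj, hc⟩)
    · left; exact h.symm
    · right
      rw [PySem.Str.startswith_eq, PySem.Chars.startswith_iff, String.toList_append]
      have h2 := pv_append_singleton_prefix s.toList '_' j hj
      rw [← hc] at h2
      exact h2

-- first-index function and its relation to pvCatIndex
def pvFirstIdx? (c : String) : List String → Option Nat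
  | [] => none
  | x :: xs => if x = c then some 0 else (pvFirstIdx? c xs).map (· + 1)

lemma pvFirstIdx?_none (c : String) (l : List String) :
    pvFirstIdx? c l = none ↔ c ∉ l := by
  induction l with
  | nil => simp [pvFirstIdx?]
  | cons x xs ih =>
    by_cases hx : x = c
    · simp [pvFirstIdx?, hx]
    · simp [pvFirstIdx?, hx, ih, Ne.symm hx]

lemma pvFirstIdx?_some (c : String) (l : List String) (n : Nat)
    (h : pvFirstIdx? c l = some n) :
    l[n]? = some c ∧ ∀ m < n, l[m]? ≠ some c := by
  induction l generalizing n with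
  | nil => simp [pvFirstIdx?] at h
  | cons x xs ih =>
    by_cases hx : x = c
    · simp [pvFirstIdx?, hx] at h
      subst hx
      subst h
      exact ⟨by simp, by omega⟩
    · simp only [pvFirstIdx?, if_neg hx, Option.map_eq_some_iff] at h
      obtain ⟨n', hn', rfl⟩ := h
      obtain ⟨h1, h2⟩ := ih n' hn'
      refine ⟨by simpa using h1, ?_⟩
      intro m hm
      cases m with
      | zero => simpa using hx
      | succ m' =>
        have := h2 m' (by omega)
        simpa using this

lemma pvFirstIdx?_le (c : String) (l : List String) (m : Nat) (hm : l[m]? = some c) :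
    ∃ n ≤ m, pvFirstIdx? c l = some n := by
  induction l generalizing m with
  | nil => simp at hm
  | cons x xs ih =>
    by_cases hx : x = c
    · exact ⟨0, by omega, by simp [pvFirstIdx?, hx]⟩
    · cases m with
      | zero => simp at hm; exact absurd hm hx
      | succ m' =>
        obtain ⟨n, hn, h⟩ := ih m' (by simpa using hm)
        exact ⟨n + 1, by omega, by simp [pvFirstIdx?, hx, h]⟩

lemma pvCatIndexAux (cats : List String) :
    ∀ (i : Int) (d : PySem.Dict String Int) (c : String),
      ((PySem.List.enumerate cats i).foldl
          (fun d p => if d.contains p.2 then d else d.insert p.2 p.1) d).get? c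
        = (d.get? c).or ((pvFirstIdx? c cats).map (fun n => i + n)) := by
  induction cats with
  | nil => intro i d c; simp [PySem.List.enumerate_nil, pvFirstIdx?]
  | cons x xs ih =>
    intro i d c
    rw [PySem.List.enumerate_cons, List.foldl_cons, ih]
    by_cases hx : x = c
    · subst hx
      by_cases hc : d.contains x = true
      · rw [if_pos hc]
        have hs : (d.get? x).isSome := by
          rw [← PySem.Dict.contains_eq_isSome_get?]; exact hc
        obtain ⟨v, hv⟩ := Option.isSome_iff_exists.mp hs
        simp [hv, pvFirstIdx?]
      · rw [if_neg hc]
        have hn : d.get? x = none := by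
          cases hg : d.get? x with
          | none => rfl
          | some v =>
            exact absurd (by rw [PySem.Dict.contains_eq_isSome_get?, hg]; rfl) hc
        simp [hn, PySem.Dict.get?_insert_self, pvFirstIdx?]
    · have hgx : ∀ (d' : PySem.Dict String Int),
          (if d.contains x = true then d else d.insert x i).get? c = d.get? c := by
        intro _
        split
        · rfl
        · exact PySem.Dict.get?_insert_of_ne d i (Ne.symm hx)
      rw [hgx d]
      simp only [pvFirstIdx?, if_neg hx]
      cases hfi : pvFirstIdx? c xs with
      | none => simp
      | some n =>
        cases hg : d.get? c <;> simp <;> ring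

lemma pvCatIndex_get? (cats : List String) (c : String) :
    (pvCatIndex cats).get? c = (pvFirstIdx? c cats).map (fun n => (n : Int)) := by
  unfold pvCatIndex
  rw [pvCatIndexAux cats 0 PySem.Dict.empty c]
  simp

-- A's inner loop = first match
lemma pvCatLoopA_of_none (s : String) (cats : List String)
    (h : ∀ col ∈ cats, pvP s col = false) : pvCatLoopA s cats = s := by
  induction cats with
  | nil => rfl
  | cons col rest ih =>
    have hcol : pvP s col = false := h col (by simp)
    unfold pvCatLoopA
    rw [show (s == col || PySem.Str.startswith s (col ++ "_")) = pvP s col from rfl, hcol]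
    simp only [Bool.false_eq_true, if_false]
    exact ih (fun c hc => h c (by simp [hc]))

lemma pvCatLoopA_of_first (s : String) (cats : List String) (n : Nat) (col : String)
    (hn : cats[n]? = some col) (hp : pvP s col = true)
    (hmin : ∀ m < n, ∀ c, cats[m]? = some c → pvP s c = false) :
    pvCatLoopA s cats = col := by
  induction cats generalizing n with
  | nil => simp at hn
  | cons x rest ih =>
    cases n with
    | zero =>
      simp only [List.getElem?_cons_zero, Option.some.injEq] at hn
      subst hn
      unfold pvCatLoopA
      rw [show (s == x || PySem.Str.startswith s (x ++ "_")) = pvP s x from rfl, hp]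
      simp
    | succ n' =>
      have hx : pvP s x = false := hmin 0 (by omega) x (by simp)
      unfold pvCatLoopA
      rw [show (s == x || PySem.Str.startswith s (x ++ "_")) = pvP s x from rfl, hx]
      simp only [Bool.false_eq_true, if_false]
      exact ih n' (by simpa using hn)
        (fun m hm c hc => hmin (m + 1) (by omega) c (by simpa using hc))

-- B's best fold = running minimum over the selected candidate entries
def pvMinStep (best : Option (Int × String)) (q : Int × String) : Option (Int × String) :=
  match best with
  | none => some q
  | some b => if q.1 < b.1 then some q else best

def pvSel (catIndex : PySem.Dict String Int) (s : String) (p : Int × Char) : Option (Int × String) :=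
  if p.2 == '_' then
    (catIndex.get? (PySem.Str.slice s none (some p.1))).map
      (fun k => (k, PySem.Str.slice s none (some p.1)))
  else none

lemma pvBestStep_eq (ci : PySem.Dict String Int) (s : String) (best : Option (Int × String))
    (p : Int × Char) :
    pvBestStep ci s best p = match pvSel ci s p with
      | some q => pvMinStep best q
      | none => best := by
  unfold pvBestStep pvSel pvMinStep
  by_cases hp : (p.2 == '_') = true
  · rw [if_pos hp, if_pos hp]
    cases hg : ci.get? (PySem.Str.slice s none (some p.1)) with
    | none => simp [hg]
    | some k =>
      cases best with
      | none => simp [hg]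
      | some b => simp [hg]
  · rw [if_neg hp, if_neg hp]

lemma pv_foldl_bestStep (ci : PySem.Dict String Int) (s : String) :
    ∀ (E : List (Int × Char)) (b0 : Option (Int × String)),
      E.foldl (pvBestStep ci s) b0 = (E.filterMap (pvSel ci s)).foldl pvMinStep b0 := by
  intro E
  induction E with
  | nil => intro b0; rfl
  | cons p E ih =>
    intro b0
    rw [List.foldl_cons, pvBestStep_eq, List.filterMap_cons]
    cases hs : pvSel ci s p with
    | none => exact ih b0
    | some q => rw [List.foldl_cons]; exact ih (pvMinStep b0 q)

lemma pvMinStep_isSome (b0 : Option (Int × String)) (q : Int × String) :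
    (pvMinStep b0 q).isSome := by
  cases b0 with
  | none => rfl
  | some b => simp only [pvMinStep]; split <;> rfl

lemma pv_minfold_none (qs : List (Int × String)) (b0 : Option (Int × String))
    (h : qs.foldl pvMinStep b0 = none) : b0 = none ∧ qs = [] := by
  induction qs generalizing b0 with
  | nil => exact ⟨h, rfl⟩
  | cons q qs ih =>
    rw [List.foldl_cons] at h
    have h2 := (ih _ h).1
    have := pvMinStep_isSome b0 q
    rw [h2] at this
    simp at this

lemma pv_minfold_some (qs : List (Int × String)) :
    ∀ (b0 : Option (Int × String)) (p : Int × String),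
      qs.foldl pvMinStep b0 = some p →
      p ∈ b0.toList ++ qs ∧ ∀ q ∈ b0.toList ++ qs, p.1 ≤ q.1 := by
  induction qs with
  | nil =>
    intro b0 p h
    simp only [List.foldl_nil] at h
    subst h
    simp
  | cons q qs ih =>
    intro b0 p h
    rw [List.foldl_cons] at h
    obtain ⟨hmem, hmin⟩ := ih (pvMinStep b0 q) p h
    cases b0 with
    | none =>
      simp only [pvMinStep] at hmem hmin
      simp only [Option.toList_none, List.nil_append] at *
      simp only [Option.toList_some, List.singleton_append] at hmem hmin
      refine ⟨hmem, ?_⟩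
      intro q' hq'
      rcases List.mem_cons.mp hq' with rfl | hq'
      · exact hmin q' (by simp)
      · exact hmin q' (by simp [hq'])
    | some b =>
      simp only [pvMinStep] at hmem hmin
      by_cases hlt : q.1 < b.1
      · rw [if_pos hlt] at hmem hmin
        simp only [Option.toList_some, List.singleton_append] at hmem hmin ⊢
        refine ⟨List.mem_cons_of_mem _ hmem, ?_⟩
        intro q' hq'
        rcases List.mem_cons.mp hq' with rfl | hq'
        · exact le_trans (hmin q (by simp)) (le_of_lt hlt)
        · exact hmin q' hq'
      · rw [if_neg hlt] at hmem hmin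
        simp only [Option.toList_some, List.singleton_append] at hmem hmin ⊢
        refine ⟨?_, ?_⟩
        · rcases List.mem_cons.mp hmem with rfl | hmem
          · exact List.mem_cons_self
          · exact List.mem_cons_of_mem _ (List.mem_cons_of_mem _ hmem)
        · intro q' hq'
          rcases List.mem_cons.mp hq' with rfl | hq'
          · exact hmin q' (by simp)
          · rcases List.mem_cons.mp hq' with rfl | hq'2
            · exact le_trans (hmin b (by simp)) (le_of_not_gt hlt)
            · exact hmin q' (by simp [hq'2])

lemma pv_slice_take (s : String) (j : Nat) :
    (PySem.Str.slice s none (some (j : Int))).toList = s.toList.take j := by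
  rw [PySem.Str.toList_slice, PySem.Chars.slice_eq_listSlice]
  have h := PySem.List.slice_to (xs := s.toList) (b := (j : Int)) (by positivity)
  rw [h]; simp

lemma pv_mem_entries (ci : PySem.Dict String Int) (s : String) (q : Int × String) :
    q ∈ (PySem.List.enumerate s.toList).filterMap (pvSel ci s) ↔
      ∃ j : Nat, s.toList[j]? = some '_' ∧
        q.2.toList = s.toList.take j ∧ ci.get? q.2 = some q.1 := by
  constructor
  · intro hmem
    rw [List.mem_filterMap] at hmem
    obtain ⟨a, ha, hsel⟩ := hmem
    rw [PySem.List.mem_enumerate_iff] at ha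
    obtain ⟨k, hk, rfl⟩ := ha
    simp only [zero_add] at hsel
    unfold pvSel at hsel
    by_cases hu : (s.toList[k] == '_') = true
    · rw [if_pos hu] at hsel
      rw [Option.map_eq_some_iff] at hsel
      obtain ⟨k', hk', rfl⟩ := hsel
      refine ⟨k, ?_, ?_, ?_⟩
      · rw [List.getElem?_eq_getElem hk]
        exact congrArg some (beq_iff_eq.mp hu)
      · exact pv_slice_take s k
      · exact hk'
    · rw [if_neg hu] at hsel
      simp at hsel
  · rintro ⟨j, hj, hq2, hget⟩
    rw [List.mem_filterMap]
    have hjlen : j < s.toList.length := by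
      by_contra hh
      rw [List.getElem?_eq_none (by omega)] at hj
      simp at hj
    refine ⟨((j : Int), s.toList[j]), ?_, ?_⟩
    · rw [PySem.List.mem_enumerate_iff]
      exact ⟨j, hjlen, by simp⟩
    · unfold pvSel
      have hju : s.toList[j] = '_' := by
        rw [List.getElem?_eq_getElem hjlen] at hj
        simpa using hj
      rw [if_pos (by simp [hju])]
      have hslice : PySem.Str.slice s none (some ((j : Int))) = q.2 := by
        apply String.toList_inj.mp
        rw [pv_slice_take, hq2]
      rw [hslice, hget]
      simp

-- the central lemma: A's linear scan and B's prefix probing agree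
lemma pv_mapped_eq (cats : List String) (s : String) :
    pvCatLoopA s cats = pvMappedB (pvCatIndex cats) s := by
  simp only [pvMappedB]
  rw [pv_foldl_bestStep]
  cases hr : ((PySem.List.enumerate s.toList).filterMap (pvSel (pvCatIndex cats) s)).foldl pvMinStep
      (match (pvCatIndex cats).get? s with | some k => some (k, s) | none => none) with
  | none =>
    obtain ⟨hb0, hqs⟩ := pv_minfold_none _ _ hr
    have hgs : (pvCatIndex cats).get? s = none := by
      cases hg : (pvCatIndex cats).get? s with
      | none => rfl
      | some k => rw [hg] at hb0; simp at hb0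
    have hs_not : s ∉ cats := by
      rw [pvCatIndex_get?] at hgs
      cases hfi : pvFirstIdx? s cats with
      | none => exact (pvFirstIdx?_none s cats).mp hfi
      | some n => rw [hfi] at hgs; simp at hgs
    have hnone : ∀ col ∈ cats, pvP s col = false := by
      intro col hcol
      by_contra hcc
      rw [Bool.not_eq_false] at hcc
      rcases (pvP_iff s col).mp hcc with rfl | ⟨j, hj, hcj⟩
      · exact hs_not hcol
      · obtain ⟨n, hn⟩ : ∃ n, pvFirstIdx? col cats = some n := by
          cases hfc : pvFirstIdx? col cats with
          | none => exact absurd hcol ((pvFirstIdx?_none col cats).mp hfc)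
          | some n => exact ⟨n, rfl⟩
        have hget : (pvCatIndex cats).get? col = some ((n : Int)) := by
          rw [pvCatIndex_get?, hn]; rfl
        have hmemc : (((n : Int)), col) ∈
            (PySem.List.enumerate s.toList).filterMap (pvSel (pvCatIndex cats) s) :=
          (pv_mem_entries _ _ _).mpr ⟨j, hj, hcj, hget⟩
        rw [hqs] at hmemc
        simp at hmemc
    exact pvCatLoopA_of_none s cats hnone
  | some p =>
    obtain ⟨hmem, hmin⟩ := pv_minfold_some _ _ _ hr
    have hp : pvIsCand s p.2 ∧ (pvCatIndex cats).get? p.2 = some p.1 := by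
      rcases List.mem_append.mp hmem with hb | hq
      · cases hg : (pvCatIndex cats).get? s with
        | none => rw [hg] at hb; simp at hb
        | some k =>
          rw [hg] at hb
          simp at hb
          subst hb
          exact ⟨Or.inl rfl, hg⟩
      · obtain ⟨j, hj, hq2, hget⟩ := (pv_mem_entries _ _ _).mp hq
        exact ⟨Or.inr ⟨j, hj, hq2⟩, hget⟩
    obtain ⟨hcand, hget⟩ := hp
    rw [pvCatIndex_get?] at hget
    obtain ⟨n, hn, hp1⟩ : ∃ n, pvFirstIdx? p.2 cats = some n ∧ p.1 = ((n : Int)) := by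
      cases hf : pvFirstIdx? p.2 cats with
      | none => rw [hf] at hget; simp at hget
      | some n =>
        rw [hf] at hget
        simp at hget
        exact ⟨n, rfl, hget.symm⟩
    obtain ⟨hcn, _⟩ := pvFirstIdx?_some _ _ _ hn
    apply pvCatLoopA_of_first s cats n p.2 hcn ((pvP_iff s p.2).mpr hcand)
    intro m hm c hc
    by_contra hcc
    rw [Bool.not_eq_false] at hcc
    have hcandc := (pvP_iff s c).mp hcc
    obtain ⟨n', hn'le, hfn'⟩ := pvFirstIdx?_le c cats m hc
    have hgetc : (pvCatIndex cats).get? c = some ((n' : Int)) := by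
      rw [pvCatIndex_get?, hfn']; rfl
    have hmemc : (((n' : Int)), c) ∈
        (match (pvCatIndex cats).get? s with | some k => some (k, s) | none => none).toList ++
          (PySem.List.enumerate s.toList).filterMap (pvSel (pvCatIndex cats) s) := by
      rcases hcandc with rfl | ⟨j, hj, hcj⟩
      · rw [hgetc]
        simp
      · exact List.mem_append_right _ ((pv_mem_entries _ _ _).mpr ⟨j, hj, hcj, hgetc⟩)
    have hle := hmin _ hmemc
    rw [hp1] at hle
    simp only at hle
    omega

-- the per-feature update steps of the two ports coincide
lemma pv_step_eq (cats : List String) (d : PySem.Dict String String) (t : String) :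
    (if PySem.Str.startswith t "cat__" then
        d.insert t (pvCatLoopA (pvRemoveprefix t "cat__") cats)
      else if PySem.Str.startswith t "num__" && !(d.contains t) then
        d.insert t (pvRemoveprefix t "num__")
      else d.insert t t)
    = (if PySem.Str.startswith t "cat__" then
        d.insert t (pvMappedB (pvCatIndex cats) (PySem.Str.slice t (some 5) none))
      else if PySem.Str.startswith t "num__" && !(d.contains t) then
        d.insert t (PySem.Str.slice t (some 5) none)
      else d.insert t t) := by
  by_cases hcat : PySem.Str.startswith t "cat__" = true
  · rw [if_pos hcat, if_pos hcat]
    have h5 : pvRemoveprefix t "cat__" = PySem.Str.slice t (some 5) none := by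
      unfold pvRemoveprefix
      rw [if_pos hcat]
      rfl
    rw [h5, pv_mapped_eq cats (PySem.Str.slice t (some 5) none)]
  · rw [if_neg hcat, if_neg hcat]
    by_cases hnum : (PySem.Str.startswith t "num__" && !(d.contains t)) = true
    · rw [if_pos hnum, if_pos hnum]
      have hn : PySem.Str.startswith t "num__" = true := by
        revert hnum; cases PySem.Str.startswith t "num__" <;> simp
      have h5 : pvRemoveprefix t "num__" = PySem.Str.slice t (some 5) none := by
        unfold pvRemoveprefix
        rw [if_pos hn]
        rfl
      rw [h5]
    · rw [if_neg hnum, if_neg hnum]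

-- ===== VERDICT =====
theorem build_feature_map_py_spec : Claim_equal_build_feature_map_py := by
  intro fns cats nums hdom
  unfold Spec_build_feature_map_py build_feature_map_py build_feature_map_py_alt
  apply congrArg PySem.Dict.items
  apply PySem.List.foldl_congr_mem
  intro d t _
  exact pv_step_eq cats d t
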